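-- pv_equiv track=rewrite | github.com/112buddyd/eb-pydeckart | deckart.py | id_sorter
-- ===== SOURCE A (Python) =====
-- def id_sorter(id):
--     # This function has all possible color combinations
--     # Can compare a set of ID to a set of these and just return the
--     # proper order
--     combos = {
--         'azorius': ['W', 'U'],
--         'dimir': ['U', 'B'],
--         'rakdos': ['B', 'R'],
--         'gruul': ['R', 'G'],
--         'selesnya': ['G', 'W'],
--         'orzhov': ['W', 'B'],
--         'izzet': ['U', 'R'],
--         'golgari': ['B', 'G'],
--         'boros': ['R', 'W'],
--         'simic': ['G', 'U'],
--         'esper': ['W', 'U', 'B'],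
--         'grixis': ['U', 'B', 'R'],
--         'jund': ['B', 'R', 'G'],
--         'naya': ['R', 'G', 'W'],
--         'bant': ['G', 'W', 'U'],
--         'abzan': ['W', 'B', 'G'],
--         'jeskai': ['U', 'R', 'W'],
--         'sultai': ['B', 'G', 'U'],
--         'mardu': ['R', 'W', 'B'],
--         'temur': ['G', 'U', 'R'],
--         'nogreen': ['W', 'U', 'B', 'R'],
--         'nowhite': ['U', 'B', 'R', 'G'],
--         'noblue': ['B', 'R', 'G', 'W'],
--         'nored': ['G', 'W', 'U', 'B'],
--         'noblack': ['R', 'G', 'W', 'U'],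
--         '5c': ['W', 'U', 'B', 'R', 'G']
--     }
--
--     if len(id) == 1:
--         return id
--
--     for key in combos.keys():
--         if set(id) == set(combos[key]):
--             return combos[key]
-- ===== SOURCE B (Python) =====
-- _POS = {'W': 0, 'U': 1, 'B': 2, 'R': 3, 'G': 4}
-- _WHEEL = 'WUBRG'
--
-- def id_sorter(id):
--     # Computes the canonical guild order arithmetically on the WUBRG color wheel
--     # (arc / wedge geometry) instead of matching against a table of combinations.
--     if len(id) == 1:
--         return id
--     pos = set()
--     for c in id:
--         p = _POS.get(c)
--         if p is None:
--             return None
--         pos.add(p)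
--     n = len(pos)
--     if n == 2:
--         a, b = sorted(pos)
--         if b - a <= 2:
--             return [_WHEEL[a], _WHEEL[b]]
--         return [_WHEEL[b], _WHEEL[a]]
--     if n == 3:
--         s = sorted(pos)
--         for x in s:
--             if (x + 1) % 5 in pos and (x + 2) % 5 in pos:  # shard: the arc x, x+1, x+2
--                 return [_WHEEL[x], _WHEEL[(x + 1) % 5], _WHEEL[(x + 2) % 5]]
--         for x in s:
--             if (x + 2) % 5 in pos and (x + 3) % 5 in pos:  # wedge: middle x, outer x-2, x+2
--                 return [_WHEEL[(x + 3) % 5], _WHEEL[x], _WHEEL[(x + 2) % 5]]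
--     if n == 4:
--         m = 10 - sum(pos)  # the one missing color; the arc starts right after it
--         return [_WHEEL[(m + i) % 5] for i in range(1, 5)]
--     if n == 5:
--         return ['W', 'U', 'B', 'R', 'G']
--     return None
-- ===== Notes on version B (the rewrite author's own statement) =====
-- stated objective: faster
-- what changed: Replaces A's scan over a 26-entry table of color combinations (one set(id) comparison per entry) by arithmetic on the WUBRG color wheel: each color is mapped to its wheel position once, and the canonical order is derived from arc/wedge geometry (pairs by wheel distance, shards/wedges by locating the arc or wedge middle, 4-color by the missing color), with no table of combinations at all.
import Mathlib
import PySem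

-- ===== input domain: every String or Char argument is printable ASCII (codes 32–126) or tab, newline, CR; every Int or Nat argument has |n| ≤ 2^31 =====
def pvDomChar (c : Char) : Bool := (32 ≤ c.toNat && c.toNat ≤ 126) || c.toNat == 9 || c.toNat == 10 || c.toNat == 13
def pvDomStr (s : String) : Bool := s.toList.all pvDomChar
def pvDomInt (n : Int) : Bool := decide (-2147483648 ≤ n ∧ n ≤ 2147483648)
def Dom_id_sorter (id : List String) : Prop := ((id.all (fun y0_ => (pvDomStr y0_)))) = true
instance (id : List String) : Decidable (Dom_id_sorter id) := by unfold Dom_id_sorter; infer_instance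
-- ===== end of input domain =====

-- B replaces A's scan over a 26-entry table of color combinations (one set comparison per
-- entry) by arithmetic on the WUBRG color wheel: it maps each color to its wheel position
-- and derives the canonical order from arc/wedge geometry; no table of combinations at all.

-- ===== PORT A =====
-- the 'combos' dict of A, in insertion order (name, colour list)
def idCombos : List (String × List String) := [
  ("azorius", ["W", "U"]),
  ("dimir", ["U", "B"]),
  ("rakdos", ["B", "R"]),
  ("gruul", ["R", "G"]),
  ("selesnya", ["G", "W"]),
  ("orzhov", ["W", "B"]),
  ("izzet", ["U", "R"]),
  ("golgari", ["B", "G"]),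
  ("boros", ["R", "W"]),
  ("simic", ["G", "U"]),
  ("esper", ["W", "U", "B"]),
  ("grixis", ["U", "B", "R"]),
  ("jund", ["B", "R", "G"]),
  ("naya", ["R", "G", "W"]),
  ("bant", ["G", "W", "U"]),
  ("abzan", ["W", "B", "G"]),
  ("jeskai", ["U", "R", "W"]),
  ("sultai", ["B", "G", "U"]),
  ("mardu", ["R", "W", "B"]),
  ("temur", ["G", "U", "R"]),
  ("nogreen", ["W", "U", "B", "R"]),
  ("nowhite", ["U", "B", "R", "G"]),
  ("noblue", ["B", "R", "G", "W"]),
  ("nored", ["G", "W", "U", "B"]),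
  ("noblack", ["R", "G", "W", "U"]),
  ("5c", ["W", "U", "B", "R", "G"])]

-- A's loop: for key in combos.keys(): if set(id) == set(combos[key]): return combos[key]
def idScan (id : List String) : List (String × List String) → Option (List String)
  | [] => none
  | (_, c) :: rest =>
      if PySem.Set.equal (PySem.Set.ofList id) (PySem.Set.ofList c) then some c
      else idScan id rest

def id_sorter (id : List String) : Option (List String) :=
  if id.length == 1 then some id
  else idScan id idCombos

-- ===== PORT B =====
-- _POS = {'W': 0, 'U': 1, 'B': 2, 'R': 3, 'G': 4}
def posDict : PySem.Dict String Int := ⟨[("W", 0), ("U", 1), ("B", 2), ("R", 3), ("G", 4)]⟩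

-- _WHEEL[i]; _WHEEL is 'WUBRG' of 1-char strings, i is always in range 0..4 at every
-- use site (Python would raise IndexError otherwise, which is unreachable here)
def wheelAt (i : Int) : String :=
  (PySem.List.pyGet? ["W", "U", "B", "R", "G"] i).getD ""

-- the loop: for c in id: p = _POS.get(c); if p is None: return None; pos.add(p)
def buildPos : List String → PySem.Set Int → Option (PySem.Set Int)
  | [], pos => some pos
  | c :: rest, pos =>
      match PySem.Dict.get? posDict c with
      | none => none
      | some p => buildPos rest (PySem.Set.add pos p)

-- for x in s: if (x+1)%5 in pos and (x+2)%5 in pos: return [...]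
def shardScan (pos : PySem.Set Int) : List Int → Option (List String)
  | [] => none
  | x :: rest =>
      if PySem.Set.contains pos (PySem.Int.mod (x + 1) 5)
          && PySem.Set.contains pos (PySem.Int.mod (x + 2) 5) then
        some [wheelAt x, wheelAt (PySem.Int.mod (x + 1) 5), wheelAt (PySem.Int.mod (x + 2) 5)]
      else shardScan pos rest

-- for x in s: if (x+2)%5 in pos and (x+3)%5 in pos: return [...]
def wedgeScan (pos : PySem.Set Int) : List Int → Option (List String)
  | [] => none
  | x :: rest =>
      if PySem.Set.contains pos (PySem.Int.mod (x + 2) 5)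
          && PySem.Set.contains pos (PySem.Int.mod (x + 3) 5) then
        some [wheelAt (PySem.Int.mod (x + 3) 5), wheelAt x, wheelAt (PySem.Int.mod (x + 2) 5)]
      else wedgeScan pos rest

-- sorted(pos)
def sortedPos (pos : PySem.Set Int) : List Int :=
  PySem.List.sorted pos (fun x => x) false

-- everything after the building loop of B, as a function of the built set
def posTail (pos : PySem.Set Int) : Option (List String) :=
  let n := PySem.Set.len pos
  if n == 2 then
    match sortedPos pos with
    | [a, b] =>
        if b - a ≤ 2 then some [wheelAt a, wheelAt b]
        else some [wheelAt b, wheelAt a]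
    | _ => none  -- unreachable: sorted(pos) has exactly 2 elements here
  else if n == 3 then
    match shardScan pos (sortedPos pos) with
    | some r => some r
    | none =>
        match wedgeScan pos (sortedPos pos) with
        | some r => some r
        | none => none
  else if n == 4 then
    let m : Int := 10 - List.sum pos
    some ((PySem.List.pyRange 1 5 1).map (fun i => wheelAt (PySem.Int.mod (m + i) 5)))
  else if n == 5 then some ["W", "U", "B", "R", "G"]
  else none

def id_sorter_alt (id : List String) : Option (List String) :=
  if id.length == 1 then some id
  else
    match buildPos id PySem.Set.empty with
    | none => none
    | some pos => posTail pos

-- ===== PRECONDITION & SPEC =====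
def Spec_id_sorter (id : List String) (out : Option (List String)) : Prop := out = id_sorter_alt id
instance (id : List String) (out : Option (List String)) : Decidable (Spec_id_sorter id out) := by unfold Spec_id_sorter; infer_instance

-- ===== CLAIM (what is proved, stated in full; the proofs are below) =====
def Claim_equal_id_sorter : Prop := ∀ (id : List String), Dom_id_sorter id → Spec_id_sorter id (id_sorter id)

-- ===== LEMMAS AND PROOFS =====

-- the five color strings (the keys of posDict = the union of A's combos)
def idColors : List String := ["W", "U", "B", "R", "G"]

-- A's scan rephrased on the vector of the five membership booleans of id
def boolScan (w u b r g : Bool) : List (String × List String) → Option (List String)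
  | [] => none
  | (_, c) :: rest =>
      if (w == c.contains "W") && (u == c.contains "U") && (b == c.contains "B")
          && (r == c.contains "R") && (g == c.contains "G") then some c
      else boolScan w u b r g rest

-- the canonical position set determined by the five membership booleans
def posOf (w u b r g : Bool) : PySem.Set Int :=
  PySem.Set.ofList ((if w then [0] else []) ++ (if u then [1] else []) ++ (if b then [2] else [])
    ++ (if r then [3] else []) ++ (if g then [4] else []))

theorem posDict_get (s : String) :
    PySem.Dict.get? posDict s =
      if s = "W" then some 0 else if s = "U" then some 1 else if s = "B" then some 2
      else if s = "R" then some 3 else if s = "G" then some 4 else none := by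
  by_cases hW : s = "W"
  · subst hW; decide
  by_cases hU : s = "U"
  · subst hU; decide
  by_cases hB : s = "B"
  · subst hB; decide
  by_cases hR : s = "R"
  · subst hR; decide
  by_cases hG : s = "G"
  · subst hG; decide
  have eW : (("W" : String) == s) = false := beq_eq_false_iff_ne.mpr (Ne.symm hW)
  have eU : (("U" : String) == s) = false := beq_eq_false_iff_ne.mpr (Ne.symm hU)
  have eB : (("B" : String) == s) = false := beq_eq_false_iff_ne.mpr (Ne.symm hB)
  have eR : (("R" : String) == s) = false := beq_eq_false_iff_ne.mpr (Ne.symm hR)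
  have eG : (("G" : String) == s) = false := beq_eq_false_iff_ne.mpr (Ne.symm hG)
  simp [posDict, PySem.Dict.get?, eW, eU, eB, eR, eG,
    hW, hU, hB, hR, hG]

theorem mem_posOf (w u b r g : Bool) (i : Int) :
    i ∈ posOf w u b r g ↔
      (i = 0 ∧ w = true) ∨ (i = 1 ∧ u = true) ∨ (i = 2 ∧ b = true)
        ∨ (i = 3 ∧ r = true) ∨ (i = 4 ∧ g = true) := by
  unfold posOf
  rw [PySem.Set.mem_ofList]
  cases w <;> cases u <;> cases b <;> cases r <;> cases g <;> simp

theorem contains_eq_iff (xs ys : List String) (s : String) :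
    (xs.contains s = ys.contains s) ↔ (s ∈ xs ↔ s ∈ ys) := by
  rw [Bool.eq_iff_iff, List.contains_iff_mem, List.contains_iff_mem]

-- set(id) == set(c) reduces to the five membership booleans when both lists use only colors
theorem equal_eq_bools (id c : List String) (hid : ∀ s ∈ id, s ∈ idColors)
    (hc : ∀ s ∈ c, s ∈ idColors) :
    PySem.Set.equal (PySem.Set.ofList id) (PySem.Set.ofList c) =
      ((id.contains "W" == c.contains "W") && (id.contains "U" == c.contains "U")
        && (id.contains "B" == c.contains "B") && (id.contains "R" == c.contains "R")
        && (id.contains "G" == c.contains "G")) := by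
  rw [Bool.eq_iff_iff, PySem.Set.equal_iff]
  simp only [PySem.Set.mem_ofList, Bool.and_eq_true, beq_iff_eq, contains_eq_iff]
  constructor
  · intro h; exact ⟨⟨⟨⟨h "W", h "U"⟩, h "B"⟩, h "R"⟩, h "G"⟩
  · rintro ⟨⟨⟨⟨hW, hU⟩, hB⟩, hR⟩, hG⟩ x
    by_cases hx : x ∈ idColors
    · simp only [idColors, List.mem_cons, List.not_mem_nil, or_false] at hx
      rcases hx with rfl | rfl | rfl | rfl | rfl
      exacts [hW, hU, hB, hR, hG]
    · exact ⟨fun hm => absurd (hid x hm) hx, fun hm => absurd (hc x hm) hx⟩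

theorem idScan_eq_boolScan (id : List String) (hid : ∀ s ∈ id, s ∈ idColors)
    (L : List (String × List String)) (hL : ∀ p ∈ L, ∀ s ∈ p.2, s ∈ idColors) :
    idScan id L = boolScan (id.contains "W") (id.contains "U") (id.contains "B")
      (id.contains "R") (id.contains "G") L := by
  induction L with
  | nil => rfl
  | cons p rest ih =>
    obtain ⟨n, c⟩ := p
    have hc : ∀ s ∈ c, s ∈ idColors := hL (n, c) (List.mem_cons_self)
    have hrest := ih (fun p hp => hL p (List.mem_cons_of_mem _ hp))
    simp only [idScan, boolScan, equal_eq_bools id c hid hc, hrest]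

theorem idScan_none (id : List String) (s : String) (hs : s ∈ id) (hns : s ∉ idColors)
    (L : List (String × List String)) (hL : ∀ p ∈ L, ∀ t ∈ p.2, t ∈ idColors) :
    idScan id L = none := by
  induction L with
  | nil => rfl
  | cons p rest ih =>
    obtain ⟨n, c⟩ := p
    have hne : PySem.Set.equal (PySem.Set.ofList id) (PySem.Set.ofList c) = false := by
      rw [Bool.eq_false_iff]
      intro hEq
      have hx := (PySem.Set.equal_iff _ _).mp hEq s
      rw [PySem.Set.mem_ofList, PySem.Set.mem_ofList] at hx
      exact hns (hL (n, c) (List.mem_cons_self) s (hx.mp hs))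
    simp only [idScan, hne, Bool.false_eq_true, if_false]
    exact ih (fun p hp => hL p (List.mem_cons_of_mem _ hp))

theorem buildPos_none (id : List String) (s : String) (hs : s ∈ id) (hns : s ∉ idColors) :
    ∀ acc, buildPos id acc = none := by
  induction id with
  | nil => exact absurd hs List.not_mem_nil
  | cons c rest ih =>
    intro acc
    rcases List.mem_cons.mp hs with rfl | hs'
    · have : PySem.Dict.get? posDict s = none := by
        rw [posDict_get]
        simp only [idColors, List.mem_cons, List.not_mem_nil, or_false, not_or] at hns
        obtain ⟨h1, h2, h3, h4, h5⟩ := hns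
        simp [h1, h2, h3, h4, h5]
      simp [buildPos, this]
    · simp only [buildPos]
      cases PySem.Dict.get? posDict c with
      | none => rfl
      | some p => exact ih hs' _

theorem buildPos_some (id : List String) (hid : ∀ s ∈ id, s ∈ idColors) :
    ∀ acc : PySem.Set Int, acc.Nodup →
      ∃ pos, buildPos id acc = some pos ∧ pos.Nodup ∧
        (∀ i, i ∈ pos ↔ i ∈ acc ∨ ∃ s ∈ id, PySem.Dict.get? posDict s = some i) := by
  induction id with
  | nil =>
    intro acc hacc
    exact ⟨acc, rfl, hacc, fun i => by simp⟩
  | cons c rest ih =>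
    intro acc hacc
    obtain ⟨p, hp⟩ : ∃ p, PySem.Dict.get? posDict c = some p := by
      have hc := hid c (List.mem_cons_self)
      simp only [idColors, List.mem_cons, List.not_mem_nil, or_false] at hc
      rw [posDict_get]
      rcases hc with rfl | rfl | rfl | rfl | rfl <;> simp
    obtain ⟨pos, hbuild, hnd, hmem⟩ :=
      ih (fun s hs => hid s (List.mem_cons_of_mem _ hs)) (PySem.Set.add acc p)
        (PySem.Set.nodup_add acc p hacc)
    refine ⟨pos, by simp [buildPos, hp, hbuild], hnd, fun i => ?_⟩
    rw [hmem i, PySem.Set.mem_add]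
    constructor
    · rintro ((hi | rfl) | ⟨s, hs, hsi⟩)
      · exact Or.inl hi
      · exact Or.inr ⟨c, List.mem_cons_self, hp⟩
      · exact Or.inr ⟨s, List.mem_cons_of_mem _ hs, hsi⟩
    · rintro (hi | ⟨s, hs, hsi⟩)
      · exact Or.inl (Or.inl hi)
      · rcases List.mem_cons.mp hs with rfl | hs'
        · rw [hp] at hsi
          exact Or.inl (Or.inr (Option.some_injective _ hsi).symm)
        · exact Or.inr ⟨s, hs', hsi⟩

theorem shardScan_congr (pos pos' : PySem.Set Int)
    (h : ∀ i, PySem.Set.contains pos i = PySem.Set.contains pos' i) (l : List Int) :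
    shardScan pos l = shardScan pos' l := by
  induction l with
  | nil => rfl
  | cons x rest ih => simp only [shardScan, h, ih]

theorem wedgeScan_congr (pos pos' : PySem.Set Int)
    (h : ∀ i, PySem.Set.contains pos i = PySem.Set.contains pos' i) (l : List Int) :
    wedgeScan pos l = wedgeScan pos' l := by
  induction l with
  | nil => rfl
  | cons x rest ih => simp only [wedgeScan, h, ih]

theorem posTail_congr (pos pos' : PySem.Set Int) (hn : pos.Nodup) (hn' : pos'.Nodup)
    (h : ∀ i, i ∈ pos ↔ i ∈ pos') : posTail pos = posTail pos' := by
  have hperm : List.Perm pos pos' := (List.perm_ext_iff_of_nodup hn hn').mpr h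
  have hlen : PySem.Set.len pos = PySem.Set.len pos' := by
    simp [PySem.Set.len, hperm.length_eq]
  have hsorted : sortedPos pos = sortedPos pos' := by
    unfold sortedPos
    refine PySem.List.sorted_eq_of_perm_of_pairwise_lt pos
      (PySem.List.sorted pos' (fun x => x) false) (fun x => x)
      ((PySem.List.sorted_perm pos' (fun x => x) false).trans hperm.symm) ?_
    have h1 := PySem.List.sorted_pairwise pos' (fun x => x)
    have h2 : (PySem.List.sorted pos' (fun x => x) false).Nodup :=
      (PySem.List.sorted_perm pos' (fun x => x) false).nodup_iff.mpr hn'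
    exact (h1.and h2).imp (fun hab => lt_of_le_of_ne hab.1 hab.2)
  have hcont : ∀ i, PySem.Set.contains pos i = PySem.Set.contains pos' i := fun i => by
    rw [Bool.eq_iff_iff, PySem.Set.contains_iff, PySem.Set.contains_iff]
    exact h i
  have hsum : List.sum pos = List.sum pos' := hperm.sum_eq
  unfold posTail
  rw [hlen, hsorted, hsum, shardScan_congr pos pos' hcont, wedgeScan_congr pos pos' hcont]

-- the two boolean-vector computations agree (32 cases)
theorem boolScan_eq_posTail :
    ∀ w u b r g : Bool, boolScan w u b r g idCombos = posTail (posOf w u b r g) := by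
  decide

-- ===== VERDICT (by name: the statement is the Claim_ definition above) =====
theorem id_sorter_spec : Claim_equal_id_sorter := by
  intro id _
  unfold Spec_id_sorter id_sorter id_sorter_alt
  by_cases h1 : id.length == 1
  · simp [h1]
  · simp only [h1, Bool.false_eq_true, if_false]
    by_cases hval : ∀ s ∈ id, s ∈ idColors
    · obtain ⟨pos, hbuild, hnd, hmem⟩ :=
        buildPos_some id hval PySem.Set.empty List.nodup_nil
      rw [idScan_eq_boolScan id hval idCombos (by decide), boolScan_eq_posTail, hbuild]
      refine posTail_congr _ _ (PySem.Set.nodup_ofList _) hnd (fun i => ?_)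
      rw [mem_posOf, hmem i]
      simp only [PySem.Set.empty, List.not_mem_nil, false_or]
      constructor
      · rintro (⟨rfl, hw⟩ | ⟨rfl, hu⟩ | ⟨rfl, hb⟩ | ⟨rfl, hr⟩ | ⟨rfl, hg⟩)
        exacts [⟨"W", List.contains_iff_mem.mp hw, by rw [posDict_get]; rfl⟩,
          ⟨"U", List.contains_iff_mem.mp hu, by rw [posDict_get]; rfl⟩,
          ⟨"B", List.contains_iff_mem.mp hb, by rw [posDict_get]; rfl⟩,
          ⟨"R", List.contains_iff_mem.mp hr, by rw [posDict_get]; rfl⟩,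
          ⟨"G", List.contains_iff_mem.mp hg, by rw [posDict_get]; rfl⟩]
      · rintro ⟨s, hsid, heq⟩
        rw [posDict_get] at heq
        split_ifs at heq with hW hU hB hR hG
        · exact Or.inl ⟨(Option.some_injective _ heq).symm,
            List.contains_iff_mem.mpr (hW ▸ hsid)⟩
        · exact Or.inr (Or.inl ⟨(Option.some_injective _ heq).symm,
            List.contains_iff_mem.mpr (hU ▸ hsid)⟩)
        · exact Or.inr (Or.inr (Or.inl ⟨(Option.some_injective _ heq).symm,
            List.contains_iff_mem.mpr (hB ▸ hsid)⟩))
        · exact Or.inr (Or.inr (Or.inr (Or.inl ⟨(Option.some_injective _ heq).symm,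
            List.contains_iff_mem.mpr (hR ▸ hsid)⟩)))
        · exact Or.inr (Or.inr (Or.inr (Or.inr ⟨(Option.some_injective _ heq).symm,
            List.contains_iff_mem.mpr (hG ▸ hsid)⟩)))
    · push Not at hval
      obtain ⟨s, hs, hns⟩ := hval
      rw [idScan_none id s hs hns idCombos (by decide), buildPos_none id s hs hns]
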